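-- pv_equiv track=rewrite | github.com/miliar/Code_Jam_Webscraper | solutions_python/Problem_200/4525.py | decrease_by_one
-- ===== SOURCE A (Python) =====
-- def decrease_by_one(nums):
--   new_nums = [0 for _ in nums]
--   len_nums = len(nums)
--   to_remember = 0
--   for i in reversed(range(len_nums)):
--     if nums[i] == 0 and i == len_nums-1:
--       nums[i] = 9
--       to_remember = 1
--     elif nums[i] != 0 and i == len_nums-1:
--       nums[i] = nums[i] - 1
--       to_remember = 0
--     elif nums[i] == 0 and to_remember > 0:
--       nums[i] = 9
--       to_remember = 1
--     elif nums[i] != 0 and to_remember > 0: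
--       nums[i] = nums[i] - to_remember
--       to_remember = 0
--     else:
--       nums[i] = nums[i]
--   # delete leading zero if any
--   if nums[0] == 0:
--     return nums[1:]
--   return nums
-- ===== SOURCE B (Python) =====
-- def decrease_by_one(nums):
--   # Forward pass: split nums into (acc = prefix up to & including last nonzero, z = trailing zeros)
--   acc = []
--   z = 0
--   for d in nums:
--     if d == 0:
--       z += 1
--     else:
--       acc.extend([0] * z)
--       acc.append(d)
--       z = 0
--   # Closed-form assembly: decrement the last nonzero, trailing zeros all become 9
--   if acc:
--     res = acc[:-1] + [acc[-1] - 1] + [9] * z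
--   else:
--     res = [9] * z
--   return res[1:] if res[0] == 0 else res
-- ===== Notes on version B (the rewrite author's own statement) =====
-- stated objective: alternative
-- what changed: Replaced A's right-to-left five-branch carry state machine (which propagates a borrow index by index, mutating in place) with a forward single pass that merely partitions the list into the prefix ending at the last nonzero digit and a count of trailing zeros, then assembles the answer in closed form (prefix unchanged, last nonzero decremented once, trailing zeros replaced by that many 9s); no borrow is ever propagated.
-- outside the precondition, e.g. on decrease_by_one([]): A raises IndexError, B raises IndexError
import Mathlib
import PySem

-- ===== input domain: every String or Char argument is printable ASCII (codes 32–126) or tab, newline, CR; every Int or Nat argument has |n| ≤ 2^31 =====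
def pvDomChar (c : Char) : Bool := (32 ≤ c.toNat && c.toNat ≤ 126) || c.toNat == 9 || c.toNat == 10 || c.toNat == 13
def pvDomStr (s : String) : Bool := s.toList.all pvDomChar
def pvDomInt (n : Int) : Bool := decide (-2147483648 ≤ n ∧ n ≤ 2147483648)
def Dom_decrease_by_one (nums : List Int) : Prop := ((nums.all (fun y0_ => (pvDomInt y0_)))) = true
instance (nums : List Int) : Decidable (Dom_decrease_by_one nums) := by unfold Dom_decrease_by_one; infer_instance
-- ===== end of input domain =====

-- B replaces A's right-to-left carry state machine by a forward pass that splits the list into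
-- (prefix through the last nonzero digit, trailing-zero count) and assembles the answer in closed
-- form; same cost, no borrow propagation (objective: alternative). A mutates `nums` in place in
-- Python, B does not; the equivalence proved here is about the return value only.

-- ===== PORT A =====
-- one loop iteration of A: i is always a valid index, so nums[i] is ns.getD i 0
def pvStepA (len : Nat) (st : List Int × Int) (i : Nat) : List Int × Int :=
  let ns := st.1
  let rem := st.2
  let v := ns.getD i 0
  if v = 0 ∧ i = len - 1 then (ns.set i 9, 1)
  else if v ≠ 0 ∧ i = len - 1 then (ns.set i (v - 1), 0)
  else if v = 0 ∧ rem > 0 then (ns.set i 9, 1)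
  else if v ≠ 0 ∧ rem > 0 then (ns.set i (v - rem), 0)
  else (ns.set i v, rem)

def decrease_by_one (nums : List Int) : List Int :=
  let len := nums.length
  -- for i in reversed(range(len_nums)): …
  let r := ((List.range len).reverse).foldl (pvStepA len) (nums, 0)
  let ns := r.1
  -- if nums[0] == 0: return nums[1:]  (nums[0] raises on [], excluded by Pre_)
  if ns.getD 0 0 = 0 then ns.drop 1 else ns

-- ===== PORT B =====
-- B's forward pass: state = (acc = prefix through the last nonzero seen, z = zeros after it);
-- z is a count of zeros, always nonnegative in Source B, so it is a Nat here.
def pvStepB (st : List Int × Nat) (d : Int) : List Int × Nat :=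
  if d = 0 then (st.1, st.2 + 1)
  else (st.1 ++ List.replicate st.2 0 ++ [d], 0)

def decrease_by_one_alt (nums : List Int) : List Int :=
  let r := nums.foldl pvStepB ([], 0)
  let acc := r.1
  let z := r.2
  -- closed-form assembly: acc[:-1] + [acc[-1] - 1] + [9]*z, or [9]*z if acc is empty
  let res := if acc ≠ [] then acc.dropLast ++ [acc.getLast! - 1] ++ List.replicate z 9
             else List.replicate z 9
  -- res[1:] if res[0] == 0 else res  (res[0] raises on [], excluded by Pre_)
  if res.getD 0 0 = 0 then res.drop 1 else res

-- ===== PRECONDITION & SPEC =====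
-- A (and B) raise IndexError at the final [0] subscript on the empty list; Pre_ excludes exactly that input.
def Pre_decrease_by_one (nums : List Int) : Prop := nums ≠ []
instance (nums : List Int) : Decidable (Pre_decrease_by_one nums) := by unfold Pre_decrease_by_one; infer_instance
def pvWitness_decrease_by_one : List Int := [1, 0]

def Spec_decrease_by_one (nums : List Int) (out : List Int) : Prop := out = decrease_by_one_alt nums
instance (nums : List Int) (out : List Int) : Decidable (Spec_decrease_by_one nums out) := by unfold Spec_decrease_by_one; infer_instance

-- ===== CLAIM (what is proved, stated in full; the proofs are below) =====
def Claim_equal_decrease_by_one : Prop := ∀ (nums : List Int), Dom_decrease_by_one nums → Pre_decrease_by_one nums → Spec_decrease_by_one nums (decrease_by_one nums)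

-- ===== LEMMAS AND PROOFS =====

-- Both ports are proved equal to the same reference value: the reversed borrow scan pvBorrow.
def pvBorrow : List Int → List Int
  | [] => []
  | v :: rest => if v = 0 then 9 :: pvBorrow rest else (v - 1) :: rest

-- ---- A-side: A's loop computes (pvBorrow nums.reverse).reverse ----

-- peel the largest index off the reversed range
theorem pv_range_rev_succ (k : Nat) : (List.range (k+1)).reverse = k :: (List.range k).reverse := by
  simp [List.range_succ]

-- once the carry is 0 and no index can be len-1, A's loop is the identity
theorem pv_loopA_id (len : Nat) : ∀ (k : Nat) (ns : List Int), ns.length = len → k < len →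
    ((List.range k).reverse).foldl (pvStepA len) (ns, 0) = (ns, 0) := by
  intro k
  induction k with
  | zero => intro ns _ _; simp
  | succ k ih =>
    intro ns hlen hk
    rw [pv_range_rev_succ, List.foldl_cons]
    have hkne : k ≠ len - 1 := by omega
    have hklt : k < ns.length := by omega
    have hstep : pvStepA len (ns, 0) k = (ns, 0) := by
      simp [pvStepA, List.getD, List.getElem?_eq_getElem hklt, hkne, List.set_getElem_self]
    rw [hstep]
    exact ih ns hlen (by omega)

-- with carry 1 (the i = len-1 branches coincide with the carry branches), A's loop on indices
-- k-1 … 0 computes the borrow scan on the reversed k-prefix, leaving the rest untouched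
theorem pv_loopA_borrow (len : Nat) : ∀ (k : Nat) (ns : List Int), ns.length = len → k < len →
    (((List.range k).reverse).foldl (pvStepA len) (ns, 1)).1
      = (pvBorrow ((ns.take k).reverse)).reverse ++ ns.drop k := by
  intro k
  induction k with
  | zero => intro ns _ _; simp [pvBorrow]
  | succ k ih =>
    intro ns hlen hk
    have hklt : k < ns.length := by omega
    have htake : ns.take (k+1) = ns.take k ++ [ns[k]] := by
      rw [List.take_add_one]; simp [List.getElem?_eq_getElem hklt]
    rw [pv_range_rev_succ, List.foldl_cons]
    by_cases hv : ns[k] = (0 : Int)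
    · -- digit 0: becomes 9, carry stays 1
      have hk1 : k ≠ len - 1 := by omega
      have hstep : pvStepA len (ns, 1) k = (ns.set k 9, 1) := by
        simp [pvStepA, List.getD, List.getElem?_eq_getElem hklt, hv, hk1]
      rw [hstep, ih (ns.set k 9) (by simp [hlen]) (by omega)]
      have h1 : (ns.set k 9).take k = ns.take k := by
        rw [List.take_set, List.set_eq_of_length_le (by simp)]
      have h2 : (ns.set k 9).drop k = 9 :: ns.drop (k+1) := by
        rw [List.drop_eq_getElem_cons (by simpa using hklt)]
        simp [List.drop_set]
      rw [h1, h2, htake]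
      simp [pvBorrow, hv]
    · -- nonzero digit: decremented, carry cleared, rest is identity
      have hk1 : k ≠ len - 1 := by omega
      have hstep : pvStepA len (ns, 1) k = (ns.set k (ns[k] - 1), 0) := by
        simp [pvStepA, List.getD, List.getElem?_eq_getElem hklt, hv, hk1]
      rw [hstep]
      rw [pv_loopA_id len k (ns.set k (ns[k] - 1)) (by simp [hlen]) (by omega)]
      have hset : ns.set k (ns[k] - 1) = ns.take k ++ (ns[k] - 1) :: ns.drop (k+1) := by
        rw [List.set_eq_take_append_cons_drop]; simp [hklt]
      have key : ∀ (t d : List Int), t ++ (ns[k] - 1) :: d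
          = (pvBorrow ((t ++ [ns[k]]).reverse)).reverse ++ d := by
        intro t d; simp [pvBorrow, hv]
      rw [hset, htake]
      exact key _ _

-- A's full loop produces the reference value before the leading-zero trim
theorem pv_mainA (nums : List Int) (h : nums ≠ []) :
    (((List.range nums.length).reverse).foldl (pvStepA nums.length) (nums, 0)).1
      = (pvBorrow nums.reverse).reverse := by
  obtain ⟨m, hm⟩ : ∃ m, nums.length = m + 1 :=
    ⟨nums.length - 1, by have := List.length_pos_iff.mpr h; omega⟩
  have hmlt : m < nums.length := by omega
  have hdrop : nums.drop m = [nums[m]] := by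
    rw [List.drop_eq_getElem_cons hmlt]
    have : nums.drop (m+1) = [] := by rw [List.drop_eq_nil_iff]; omega
    rw [this]
  have hrev : nums.reverse = nums[m] :: (nums.take m).reverse := by
    conv_lhs => rw [← List.take_append_drop m nums]
    rw [hdrop]; simp
  rw [hm, pv_range_rev_succ, List.foldl_cons]
  by_cases hv : nums[m] = (0 : Int)
  · have hstep : pvStepA nums.length (nums, 0) m = (nums.set m 9, 1) := by
      simp [pvStepA, List.getD, hv, hm]
    rw [hm] at hstep
    rw [hstep, pv_loopA_borrow (m+1) m (nums.set m 9) (by simp [hm]) (by omega)]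
    have h1 : (nums.set m 9).take m = nums.take m := by
      rw [List.take_set, List.set_eq_of_length_le (by simp)]
    have h2 : (nums.set m 9).drop m = [9] := by
      rw [List.drop_eq_getElem_cons (by simpa using hmlt)]
      have : (nums.set m 9).drop (m+1) = [] := by rw [List.drop_eq_nil_iff]; simp; omega
      simp [this]
    rw [h1, h2, hrev]
    simp [pvBorrow, hv]
  · have hstep : pvStepA nums.length (nums, 0) m = (nums.set m (nums[m] - 1), 0) := by
      simp [pvStepA, List.getD, hv, hm]
    rw [hm] at hstep
    rw [hstep, pv_loopA_id (m+1) m (nums.set m (nums[m] - 1)) (by simp [hm]) (by omega)]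
    have hset : nums.set m (nums[m] - 1) = nums.take m ++ (nums[m] - 1) :: nums.drop (m+1) := by
      rw [List.set_eq_take_append_cons_drop]; simp [hmlt]
    have hnil : nums.drop (m+1) = [] := by rw [List.drop_eq_nil_iff]; omega
    have key : ∀ (t : List Int), t ++ (nums[m] - 1) :: ([] : List Int)
        = (pvBorrow (nums[m] :: t.reverse)).reverse := by
      intro t; simp [pvBorrow, hv]
    rw [hset, hnil, hrev]
    exact key _

-- ---- B-side: the forward pass reconstructs nums and its assembly equals the reference ----

-- invariant of B's fold: the state reconstructs the input processed so far, and acc never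
-- ends in a zero (its last entry is the last nonzero seen)
theorem pv_foldB_inv : ∀ (xs : List Int) (acc : List Int) (z : Nat),
    (xs.foldl pvStepB (acc, z)).1 ++ List.replicate (xs.foldl pvStepB (acc, z)).2 (0 : Int)
        = acc ++ List.replicate z 0 ++ xs
    ∧ (acc.getLastD 1 ≠ 0 → (xs.foldl pvStepB (acc, z)).1.getLastD 1 ≠ 0) := by
  intro xs
  induction xs with
  | nil => intro acc z; simp
  | cons x xs ih =>
    intro acc z
    by_cases hx : x = (0 : Int)
    · have hstep : pvStepB (acc, z) x = (acc, z + 1) := by simp [pvStepB, hx]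
      rw [List.foldl_cons, hstep]
      obtain ⟨h1, h2⟩ := ih acc (z + 1)
      refine ⟨?_, h2⟩
      rw [h1, hx, List.replicate_succ' (n := z)]
      simp
    · have hstep : pvStepB (acc, z) x = (acc ++ List.replicate z 0 ++ [x], 0) := by
        simp [pvStepB, hx]
      rw [List.foldl_cons, hstep]
      obtain ⟨h1, h2⟩ := ih (acc ++ List.replicate z 0 ++ [x]) 0
      constructor
      · rw [h1]; simp
      · intro _; exact h2 (by simp [hx])

-- the borrow scan turns a block of leading zeros into nines
theorem pv_borrow_zeros (z : Nat) (r : List Int) :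
    pvBorrow (List.replicate z 0 ++ r) = List.replicate z 9 ++ pvBorrow r := by
  induction z with
  | zero => simp
  | succ z ih => simp [List.replicate_succ, pvBorrow, ih]

-- B's closed-form assembly from (acc, z) equals the reference value for acc ++ [0]*z
theorem pv_assemble (acc : List Int) (z : Nat) (hlast : acc.getLastD 1 ≠ 0) :
    (if acc ≠ [] then acc.dropLast ++ [acc.getLast! - 1] ++ List.replicate z 9
     else List.replicate z 9)
      = (pvBorrow ((acc ++ List.replicate z 0).reverse)).reverse := by
  rcases acc.eq_nil_or_concat with h | ⟨b, l, h⟩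
  · subst h
    have h0 := pv_borrow_zeros z []
    simp only [pvBorrow, List.append_nil] at h0
    simp [List.reverse_replicate, h0]
  · rw [List.concat_eq_append] at h
    subst h
    have hl : l ≠ 0 := by simpa using hlast
    have hne : b ++ [l] ≠ [] := by simp
    rw [if_pos hne]
    rw [List.reverse_append, List.reverse_replicate, pv_borrow_zeros]
    simp [pvBorrow, hl]

-- B's full computation before the trim equals the reference value
theorem pv_mainB (nums : List Int) :
    (if (nums.foldl pvStepB ([], 0)).1 ≠ [] then
        (nums.foldl pvStepB ([], 0)).1.dropLast
          ++ [(nums.foldl pvStepB ([], 0)).1.getLast! - 1]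
          ++ List.replicate (nums.foldl pvStepB ([], 0)).2 9
      else List.replicate (nums.foldl pvStepB ([], 0)).2 9)
      = (pvBorrow nums.reverse).reverse := by
  obtain ⟨h1, h2⟩ := pv_foldB_inv nums [] 0
  have hlast : (nums.foldl pvStepB ([], 0)).1.getLastD 1 ≠ 0 := h2 (by simp)
  rw [pv_assemble _ _ hlast, h1]
  simp

-- ===== VERDICT (by name: the statement is the Claim_ definition above) =====
theorem decrease_by_one_spec : Claim_equal_decrease_by_one := by
  intro nums _ hpre
  unfold Spec_decrease_by_one decrease_by_one decrease_by_one_alt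
  simp only
  rw [pv_mainA nums hpre, pv_mainB nums]
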